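/- GENERATED by tools/from_farm_form.py from prooffarm-gif/accepted/DGifGetScreenDesc.1/Lemmas.lean (a worked proof of the farm's unit `DGifGetScreenDesc.1`,
   accepted by the verdict) — do not edit. -/
import Gif.Spec.Units.DGifGetScreenDesc_1
import Gif.Spec.AllSegs

/-!
  Lemmas for the unit `DGifGetScreenDesc.1` (a BODY segment of a protected function: two checked loads, then two calls of
  `DGifGetWord`): the segment is walked in THREE STEPS that meet at the return addresses of the two calls, 0x10811f (`ret4`) and
  0x108137 (`ret5`), with a private assertion there.

      sd1_AtRet        the assertion at `ret4` / `ret5`: `Body` + `eax` is GIF_OK (1) or GIF_ERROR (0)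
      sd1_seg_head     0x1080c6 … the two checked loads … the call of DGifGetWord … 0x10811f: `Start` → `sd1_AtRet ret4`
      sd1_seg_mid      0x10811f … (the error arm: 0x1080f7) … the call of DGifGetWord … 0x108137: `sd1_AtRet ret4` → `sd1_AtRet ret5` ∨ `Exit`
      sd1_seg_tail     0x108137 … 0x10813b | 0x1080f7: `sd1_AtRet ret5` → `Body at_10813b` ∨ `Exit`

  The general lemmas are those of Gif/Spec/FrameCarry.lean §5 (`Env.at_call`).
-/

open X86 X86.User Asan ProgX.Base ProgX.Base.Spec Gif.Spec

set_option maxRecDepth 4000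
set_option maxHeartbeats 4000000

namespace Gif.Spec.DGifGetScreenDesc_1

/-- **At the return address `cut` of a call of `DGifGetWord`** (10811FH = `ret4`, 108137H = `ret5`): `Body`, and `eax` is the
callee's result, GIF_OK (1) or GIF_ERROR (0). -/
structure sd1_AtRet (cut : Word) (H : Heap) (rest : List Obj) (frames : List (Nat × FrameLayout)) (F : Forest) (R : Rd)
    (u₀ e : State) (ret : Word) (v : State) : Prop where
  body : DGifGetScreenDesc.Body cut H rest frames F R u₀ e ret v
  res : (v.reg .rax).toNat = 1 ∨ (v.reg .rax).toNat = 0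

/-- **The error exit** (108123H `mov r12d, 0 ; jmp 1080f7`, dgif_lib.c:263): a state `s` at the epilogue's first instruction that
differs from a body state `v` in `rip`, `r12 = 0` and the flags only is `Done` for the entry's heap and forest (`F.scm = none` is
the contract's pre). -/
theorem sd1_exit_err {cut : Word} {H : Heap} {rest : List Obj} {frames : List (Nat × FrameLayout)} {F : Forest} {R : Rd}
    {u₀ e : State} {ret : Word} {v s : State}
    (hbody : DGifGetScreenDesc.Body cut H rest frames F R u₀ e ret v)
    (h_rip : s.rip = Gif.L.DGifGetScreenDesc.at_1080f7)
    (h_rsp : s.reg .rsp = e.reg .rsp - 120)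
    (h_rbx : s.reg .rbx = v.reg .rbx)
    (h_rbp : s.reg .rbp = v.reg .rbp)
    (h_r12 : s.reg .r12 = Word.ofBV 0#32)
    (h_mem : s.mem = v.mem)
    (h_abi : (conv u₀).inv s) :
    DGifGetScreenDesc.Exit H rest frames F R u₀ e ret s := by
  obtain ⟨hcore, hinv, hok⟩ := hbody
  have hscm : F.scm = none := hcore.pre.2.2
  have hcore1 : DGifGetScreenDesc.Core Gif.L.DGifGetScreenDesc.at_1080f7 H rest frames F R u₀ e ret s := {
    entry := hcore.entry
    pre := hcore.pre
    rip := h_rip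
    rsp := h_rsp
    rbx := h_rbx.trans hcore.rbx
    rbp := h_rbp.trans hcore.rbp
    slot_r15 := by
      rw [h_mem]
      exact hcore.slot_r15
    slot_r14 := by
      rw [h_mem]
      exact hcore.slot_r14
    slot_r13 := by
      rw [h_mem]
      exact hcore.slot_r13
    slot_r12 := by
      rw [h_mem]
      exact hcore.slot_r12
    slot_rbp := by
      rw [h_mem]
      exact hcore.slot_rbp
    slot_rbx := by
      rw [h_mem]
      exact hcore.slot_rbx
    slot_ra := by
      rw [h_mem]
      exact hcore.slot_ra
    rem := by
      rw [h_mem]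
      exact hcore.rem
    same := by
      rw [h_mem]
      exact hcore.same
    code := by
      rw [h_mem]
      exact hcore.code
    abi := h_abi
  }
  refine ⟨H, F, ?_⟩
  exact {
    core := hcore1
    region := SameRegion.refl H
    sameBut := Forest.SameButScm.refl F
    inv := by
      rw [h_mem]
      exact hinv
    ok := by
      rw [h_mem]
      exact hok
    res := by
      right
      rw [h_r12]
      decide
    err := fun _ => hscm
  }

/-- **1080C6H … the call of DGifGetWord … 10811FH (ret4)** (dgif_lib.c:252-261): the checked load of `gif.Private`, the checked load
of `Private->FileState` (8: `IS_READABLE` holds, the `jne` is taken), `DGifGetWord(gif, &gif->SWidth)`. -/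
theorem sd1_seg_head (Lay : Layout) (hLay : Lay.hi = 0x1000000) (μ : Microarch) (hμ : UserX.MicroOK μ) (u₀ : State)
    (hcode : HasCodeNat Lay u₀ Gif.L.DGifGetScreenDesc.entry Gif.Code.code_DGifGetScreenDesc.nat Gif.L.DGifGetScreenDesc.size)
    (H : Heap) (rest : List Obj) (frames : List (Nat × FrameLayout)) (F : Forest) (R : Rd) (e : State) (ret : Word)
    (h_DGifGetWord : Calls Lay μ ProgX.Base.WayInv (ProgX.Base.conv u₀) Gif.L.DGifGetWord.entry
      (Gif.Spec.DGifGetWord.spec H rest (DGifGetScreenDesc.framesIn frames e) F R))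
    (h_asan_load8_noabort : Asan.SmallCheck Lay μ ProgX.Base.WayInv (ProgX.Base.CodeOK u₀) [.rax, .rcx, .rdx] 8
      ProgX.Base.L.__asan_load8_noabort.entry)
    (h_asan_load4_noabort : Asan.SmallCheck Lay μ ProgX.Base.WayInv (ProgX.Base.CodeOK u₀) [.rax, .rcx, .rdx] 4
      ProgX.Base.L.__asan_load4_noabort.entry)
    (v : State) (hat : DGifGetScreenDesc.Start H rest frames F R u₀ e ret v) :
    ReachVia Lay μ ProgX.Base.WayInv v (sd1_AtRet Gif.L.DGifGetScreenDesc.ret4 H rest frames F R u₀ e ret) := by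
  -- THE PRELUDE: the entry assertion `Start` = `Body` + `rdi = gif`
  obtain ⟨⟨hcore, hinv, hok⟩, c_rdi⟩ := hat
  have he := hcore.entry
  v_entry he
  obtain ⟨henv, hrdi, hscm⟩ := hcore.pre
  have w_rip := hcore.rip
  have c_rsp : v.reg .rsp = e.reg .rsp - 120 := hcore.rsp
  have c_rbx : v.reg .rbx = e.reg .rdi := hcore.rbx
  have w_kept : RegsKept [.rsp] v v := RegsKept.refl _ _
  have w_eq : Mem.EqOn ProgX.Base.L.textLo ProgX.Base.L.textHi u₀.mem v.mem := ProgX.Base.conv_code_eqOn hcore.code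
  have hdf := (show abiInv _ from hcore.abi).1
  have hmx := (show abiInv _ from hcore.abi).2
  have hsse := ProgX.Base.sseOK_of_abiInv hcore.abi
  -- the slots and the footprint that `Body` at the exit states again
  have k_r15 : v.mem.readLE (e.reg .rsp - 8) 8 = (e.reg .r15).toNat := hcore.slot_r15
  have k_r14 : v.mem.readLE (e.reg .rsp - 16) 8 = (e.reg .r14).toNat := hcore.slot_r14
  have k_r13 : v.mem.readLE (e.reg .rsp - 24) 8 = (e.reg .r13).toNat := hcore.slot_r13
  have k_r12 : v.mem.readLE (e.reg .rsp - 32) 8 = (e.reg .r12).toNat := hcore.slot_r12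
  have k_rbp : v.mem.readLE (e.reg .rsp - 40) 8 = (e.reg .rbp).toNat := hcore.slot_rbp
  have k_rbx : v.mem.readLE (e.reg .rsp - 48) 8 = (e.reg .rbx).toNat := hcore.slot_rbx
  have k_ra : UInt64.ofNat (v.mem.readLE (e.reg .rsp) 8) = ret := hcore.slot_ra
  have hsame : Mem.SameExcept
    [⟨(e.reg .rsp).toNat - 400, (e.reg .rsp).toNat⟩,
     shadowSpan ((e.reg .rsp).toNat - 120) ((e.reg .rsp).toNat - 56),
     ⟨0x800000, 0x1000020⟩,
     ⟨R.cur, R.cur + 8⟩] e.mem v.mem := hcore.same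
  -- where the cursor, gif and pv are, as numbers
  have hcur := henv.ctx.cursor_range henv.heap.inv.shadow
  have hgin := henv.ok.owns.inside henv.heap.inv.heap (o := (F.gif, 120)) List.mem_cons_self
  have hpin := henv.ok.owns.inside henv.heap.inv.heap (o := (F.pv, 24936)) (List.mem_cons_of_mem _ List.mem_cons_self)
  have hbase := henv.heap.base
  simp only at hgin hpin
  rw [hbase] at hgin hpin
  have hg1 := hgin.1
  have hg2 := hgin.2.2.2.2
  have hp1 := hpin.1
  have hp2 := hpin.2.2.2.2
  clear hgin hpin
  -- the two loads, as facts about the present memory in the walker's form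
  have hpriv := hok.shape.priv
  have hstate := hok.shape.state
  simp only [gfield] at hpriv hstate
  have l_priv : v.mem.readLE (e.reg .rdi + 0x70) 8 = F.pv := by
    rw [rd_eq_readLE v.mem (e.reg .rdi + 0x70) (F.gif + 112) 8 (by u_omega)]
    exact hpriv
  have l_state : v.mem.readLE (UInt64.ofNat F.pv) 4 = 8 := by
    rw [rd_eq_readLE v.mem (UInt64.ofNat F.pv) F.pv 4 (by u_omega)]
    exact hstate
  -- gif and pv are live under the body's frames: what the two check goals ask
  have hgl : LiveIn (H.liveObjs ++ rest) (DGifGetScreenDesc.framesIn frames e) F.gif 120 :=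
    hok.gif_live.liveIn rest _ (Nat.le_refl _) (Nat.le_refl _)
  have hpl : LiveIn (H.liveObjs ++ rest) (DGifGetScreenDesc.framesIn frames e) F.pv 24936 :=
    hok.pv_live.liveIn rest _ (Nat.le_refl _) (Nat.le_refl _)
  -- THE WALK, to the return address of the first call of DGifGetWord
  u_walk hcode [hμ.vendor] until [Gif.L.DGifGetScreenDesc.ret4] span [ProgX.Base.L.textLo, ProgX.Base.L.textHi] side (v_side)
  case check_1080ca =>
    -- dgif_lib.c:252 the load of `gif.Private`: 8 bytes inside gif
    have hun : ShadowUntouched v.mem s_1080ca.mem := by v_untouched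
    exact hgl.accSmall hinv.shadow hun _ 8 (by decide) (by u_omega) (by u_omega)
  case check_1080d6 =>
    -- dgif_lib.c:254 the load of `Private->FileState`: 4 bytes inside pv
    have hun : ShadowUntouched v.mem s_1080d6.mem := by v_untouched
    exact hpl.accSmall hinv.shadow hun _ 4 (by decide) (by u_omega) (by u_omega)
  case call_inv =>
    v_inv
  case pre_10811a =>
    -- DGIFGETWORD'S PRECONDITION. The environment for the frame list with the own frame in front: only return addresses were
    -- pushed since `v`
    have hs : Mem.SameExcept [⟨(e.reg .rsp).toNat - 400, (e.reg .rsp).toNat - 120⟩] v.mem s_10811a.mem := by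
      rw [w_mem]
      u_same
    have henv' : Env H rest (DGifGetScreenDesc.framesIn frames e) F R s_10811a := by
      refine henv.at_call hinv hok hs (by omega) (by omega) ?_ ?_ ?_
      · rw [w_rsp]
        u_omega
      · rw [w_rsp]
        u_omega
      · rw [w_rsp]
        u_omega
    -- the three clauses: `Env`, `rdi = gif`, `rsi = &gif->SWidth = gif`: 4 bytes inside `[gif, gif + 24)`
    refine ⟨henv', ?_, Or.inl ⟨?_, ?_⟩⟩
    · rw [w_rdi]
      exact hrdi
    · rw [w_rsi]
      omega
    · rw [w_rsi]
      omega
  -- 0x10811f (ret4): DGIFGETWORD HAS RETURNED. Its post: `Back`, and `eax` is 1 or 0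
  obtain ⟨hback, hres, _, _⟩ := w_post
  -- the reader at DGifGetWord's entry is where it was at `v`: only return addresses were pushed
  have hs0 : Mem.SameExcept [⟨(e.reg .rsp).toNat - 400, (e.reg .rsp).toNat - 120⟩] v.mem s_10811a.mem := by
    rw [w_mem_10811a]
    u_same
  have hrem0 : rem R s_10811a.mem = rem R v.mem := by
    apply rem_sameExcept hs0 (by omega)
    intro w hw
    have e := List.mem_singleton.mp hw
    rw [e]
    simp only
    omega
  have e_top : (s_10811a.reg .rsp).toNat + 8 = (e.reg .rsp).toNat - 120 := by
    rw [w_rsp_10811a]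
    u_omega
  -- the callee's footprint in terms of `v` (`w_same : SameExcept […] v.mem s_10811ar.mem`)
  v_after_call w_rsp_10811a w_mem_10811a
  simp only [w_rsi_10811a] at w_same
  -- THE SLOTS AND THE RETURN ADDRESS, over the pushed return address (first step) and through DGifGetWord's footprint (second step)
  have hp_r15 : s_10811a.mem.readLE (e.reg .rsp - 8) 8 = (e.reg .r15).toNat := by
    rw [w_mem_10811a]
    u_frame k_r15
  rw [w_mem_10811a] at hp_r15
  have hs_r15 : s_10811ar.mem.readLE (e.reg .rsp - 8) 8 = (e.reg .r15).toNat := by u_frame hp_r15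
  have hp_r14 : s_10811a.mem.readLE (e.reg .rsp - 16) 8 = (e.reg .r14).toNat := by
    rw [w_mem_10811a]
    u_frame k_r14
  rw [w_mem_10811a] at hp_r14
  have hs_r14 : s_10811ar.mem.readLE (e.reg .rsp - 16) 8 = (e.reg .r14).toNat := by u_frame hp_r14
  have hp_r13 : s_10811a.mem.readLE (e.reg .rsp - 24) 8 = (e.reg .r13).toNat := by
    rw [w_mem_10811a]
    u_frame k_r13
  rw [w_mem_10811a] at hp_r13
  have hs_r13 : s_10811ar.mem.readLE (e.reg .rsp - 24) 8 = (e.reg .r13).toNat := by u_frame hp_r13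
  have hp_r12 : s_10811a.mem.readLE (e.reg .rsp - 32) 8 = (e.reg .r12).toNat := by
    rw [w_mem_10811a]
    u_frame k_r12
  rw [w_mem_10811a] at hp_r12
  have hs_r12 : s_10811ar.mem.readLE (e.reg .rsp - 32) 8 = (e.reg .r12).toNat := by u_frame hp_r12
  have hp_rbp : s_10811a.mem.readLE (e.reg .rsp - 40) 8 = (e.reg .rbp).toNat := by
    rw [w_mem_10811a]
    u_frame k_rbp
  rw [w_mem_10811a] at hp_rbp
  have hs_rbp : s_10811ar.mem.readLE (e.reg .rsp - 40) 8 = (e.reg .rbp).toNat := by u_frame hp_rbp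
  have hp_rbx : s_10811a.mem.readLE (e.reg .rsp - 48) 8 = (e.reg .rbx).toNat := by
    rw [w_mem_10811a]
    u_frame k_rbx
  rw [w_mem_10811a] at hp_rbx
  have hs_rbx : s_10811ar.mem.readLE (e.reg .rsp - 48) 8 = (e.reg .rbx).toNat := by u_frame hp_rbx
  have hp_ra : UInt64.ofNat (s_10811a.mem.readLE (e.reg .rsp) 8) = ret := by
    rw [w_mem_10811a]
    u_frame k_ra
  rw [w_mem_10811a] at hp_ra
  have hs_ra : UInt64.ofNat (s_10811ar.mem.readLE (e.reg .rsp) 8) = ret := by u_frame hp_ra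
  -- the footprint since the entry: DGifGetWord's windows lie inside the function's
  have hsame1 : Mem.SameExcept
    [⟨(e.reg .rsp).toNat - 400, (e.reg .rsp).toNat⟩,
     shadowSpan ((e.reg .rsp).toNat - 120) ((e.reg .rsp).toNat - 56),
     ⟨0x800000, 0x1000020⟩,
     ⟨R.cur, R.cur + 8⟩] e.mem s_10811ar.mem := by u_same
  -- the heap's invariant comes back with the clean stack at the callee's `rsp + 8` = the body's `rsp`
  have hinv1 : HeapInv H rest (DGifGetScreenDesc.framesIn frames e) ((e.reg .rsp).toNat - 120) s_10811ar.mem := by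
    rw [← e_top]
    exact hback.inv
  -- THE EXIT ASSERTION: `Body` at `ret4`, and the result in `eax`
  have hcore1 : DGifGetScreenDesc.Core Gif.L.DGifGetScreenDesc.ret4 H rest frames F R u₀ e ret s_10811ar := {
    entry := hcore.entry
    pre := hcore.pre
    rip := w_rip
    rsp := w_rsp
    rbx := (w_kept.get .rbx rfl).trans hcore.rbx
    rbp := (w_kept.get .rbp rfl).trans hcore.rbp
    slot_r15 := hs_r15
    slot_r14 := hs_r14
    slot_r13 := hs_r13
    slot_r12 := hs_r12
    slot_rbp := hs_rbp
    slot_rbx := hs_rbx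
    slot_ra := hs_ra
    rem := by
      have h1 := hback.rem
      rw [hrem0] at h1
      exact Nat.le_trans h1 hcore.rem
    same := hsame1
    code := w_code
    abi := w_inv
  }
  refine ReachVia.done ?_
  exact {
    body := { core := hcore1, inv := hinv1, ok := hback.ok }
    res := hres
  }

/-- **10811FH (ret4) … the call of DGifGetWord … 108137H (ret5)** (dgif_lib.c:261-263): `test eax, eax`; GIF_ERROR: `r12d = 0`, to the
epilogue (1080F7H) with the entry's heap and forest; otherwise `DGifGetWord(gif, &gif->SHeight)`. -/
theorem sd1_seg_mid (Lay : Layout) (hLay : Lay.hi = 0x1000000) (μ : Microarch) (hμ : UserX.MicroOK μ) (u₀ : State)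
    (hcode : HasCodeNat Lay u₀ Gif.L.DGifGetScreenDesc.entry Gif.Code.code_DGifGetScreenDesc.nat Gif.L.DGifGetScreenDesc.size)
    (H : Heap) (rest : List Obj) (frames : List (Nat × FrameLayout)) (F : Forest) (R : Rd) (e : State) (ret : Word)
    (h_DGifGetWord : Calls Lay μ ProgX.Base.WayInv (ProgX.Base.conv u₀) Gif.L.DGifGetWord.entry
      (Gif.Spec.DGifGetWord.spec H rest (DGifGetScreenDesc.framesIn frames e) F R))
    (v : State) (hat : sd1_AtRet Gif.L.DGifGetScreenDesc.ret4 H rest frames F R u₀ e ret v) :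
    ReachVia Lay μ ProgX.Base.WayInv v (fun w =>
      sd1_AtRet Gif.L.DGifGetScreenDesc.ret5 H rest frames F R u₀ e ret w ∨
      DGifGetScreenDesc.Exit H rest frames F R u₀ e ret w) := by
  -- THE PRELUDE: the entry assertion, as in `sd1_seg_head`
  obtain ⟨⟨hcore, hinv, hok⟩, hres⟩ := hat
  have he := hcore.entry
  v_entry he
  obtain ⟨henv, hrdi, hscm⟩ := hcore.pre
  have w_rip := hcore.rip
  have c_rsp : v.reg .rsp = e.reg .rsp - 120 := hcore.rsp
  have c_rbx : v.reg .rbx = e.reg .rdi := hcore.rbx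
  -- `eax` as a variable `z` (the branch fact of `test eax, eax` speaks of it)
  obtain ⟨z, c_rax⟩ : ∃ z, v.reg .rax = z := ⟨_, rfl⟩
  rw [c_rax] at hres
  have w_kept : RegsKept [.rsp] v v := RegsKept.refl _ _
  have w_eq : Mem.EqOn ProgX.Base.L.textLo ProgX.Base.L.textHi u₀.mem v.mem := ProgX.Base.conv_code_eqOn hcore.code
  have hdf := (show abiInv _ from hcore.abi).1
  have hmx := (show abiInv _ from hcore.abi).2
  have hsse := ProgX.Base.sseOK_of_abiInv hcore.abi
  have k_r15 : v.mem.readLE (e.reg .rsp - 8) 8 = (e.reg .r15).toNat := hcore.slot_r15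
  have k_r14 : v.mem.readLE (e.reg .rsp - 16) 8 = (e.reg .r14).toNat := hcore.slot_r14
  have k_r13 : v.mem.readLE (e.reg .rsp - 24) 8 = (e.reg .r13).toNat := hcore.slot_r13
  have k_r12 : v.mem.readLE (e.reg .rsp - 32) 8 = (e.reg .r12).toNat := hcore.slot_r12
  have k_rbp : v.mem.readLE (e.reg .rsp - 40) 8 = (e.reg .rbp).toNat := hcore.slot_rbp
  have k_rbx : v.mem.readLE (e.reg .rsp - 48) 8 = (e.reg .rbx).toNat := hcore.slot_rbx
  have k_ra : UInt64.ofNat (v.mem.readLE (e.reg .rsp) 8) = ret := hcore.slot_ra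
  have hsame : Mem.SameExcept
    [⟨(e.reg .rsp).toNat - 400, (e.reg .rsp).toNat⟩,
     shadowSpan ((e.reg .rsp).toNat - 120) ((e.reg .rsp).toNat - 56),
     ⟨0x800000, 0x1000020⟩,
     ⟨R.cur, R.cur + 8⟩] e.mem v.mem := hcore.same
  -- where the cursor and gif are, as numbers
  have hcur := henv.ctx.cursor_range henv.heap.inv.shadow
  have hgin := henv.ok.owns.inside henv.heap.inv.heap (o := (F.gif, 120)) List.mem_cons_self
  have hbase := henv.heap.base
  simp only at hgin
  rw [hbase] at hgin
  have hg1 := hgin.1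
  have hg2 := hgin.2.2.2.2
  clear hgin
  -- THE WALK, to the return address of the second call of DGifGetWord or to the epilogue
  u_walk hcode [hμ.vendor] until [Gif.L.DGifGetScreenDesc.ret5, Gif.L.DGifGetScreenDesc.at_1080f7]
    span [ProgX.Base.L.textLo, ProgX.Base.L.textHi] side (v_side)
  case call_inv =>
    v_inv
  case pre_108132 =>
    -- DGIFGETWORD'S PRECONDITION. The environment for the frame list with the own frame in front: only the return address was
    -- pushed since `v`
    have hs : Mem.SameExcept [⟨(e.reg .rsp).toNat - 400, (e.reg .rsp).toNat - 120⟩] v.mem s_108132.mem := by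
      rw [w_mem]
      u_same
    have henv' : Env H rest (DGifGetScreenDesc.framesIn frames e) F R s_108132 := by
      refine henv.at_call hinv hok hs (by omega) (by omega) ?_ ?_ ?_
      · rw [w_rsp]
        u_omega
      · rw [w_rsp]
        u_omega
      · rw [w_rsp]
        u_omega
    -- the three clauses: `Env`, `rdi = gif`, `rsi = &gif->SHeight = gif + 4`: 4 bytes inside `[gif, gif + 24)`
    refine ⟨henv', ?_, Or.inl ⟨?_, ?_⟩⟩
    · rw [w_rdi]
      exact hrdi
    · rw [w_rsi]
      u_omega
    · rw [w_rsi]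
      u_omega
  · -- 0x108137 (ret5): DGIFGETWORD HAS RETURNED. Its post: `Back`, and `eax` is 1 or 0
    obtain ⟨hback, hres1, _, _⟩ := w_post
    -- the reader at DGifGetWord's entry is where it was at `v`: only the return address was pushed
    have hs0 : Mem.SameExcept [⟨(e.reg .rsp).toNat - 400, (e.reg .rsp).toNat - 120⟩] v.mem s_108132.mem := by
      rw [w_mem_108132]
      u_same
    have hrem0 : rem R s_108132.mem = rem R v.mem := by
      apply rem_sameExcept hs0 (by omega)
      intro w hw
      have e := List.mem_singleton.mp hw
      rw [e]
      simp only
      omega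
    have e_top : (s_108132.reg .rsp).toNat + 8 = (e.reg .rsp).toNat - 120 := by
      rw [w_rsp_108132]
      u_omega
    -- the callee's footprint in terms of `v` (`w_same : SameExcept […] v.mem s_108132r.mem`)
    v_after_call w_rsp_108132 w_mem_108132
    simp only [w_rsi_108132] at w_same
    -- THE SLOTS AND THE RETURN ADDRESS, over the pushed return address (first step) and through DGifGetWord's footprint (second step)
    have hp_r15 : s_108132.mem.readLE (e.reg .rsp - 8) 8 = (e.reg .r15).toNat := by
      rw [w_mem_108132]
      u_frame k_r15
    rw [w_mem_108132] at hp_r15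
    have hs_r15 : s_108132r.mem.readLE (e.reg .rsp - 8) 8 = (e.reg .r15).toNat := by u_frame hp_r15
    have hp_r14 : s_108132.mem.readLE (e.reg .rsp - 16) 8 = (e.reg .r14).toNat := by
      rw [w_mem_108132]
      u_frame k_r14
    rw [w_mem_108132] at hp_r14
    have hs_r14 : s_108132r.mem.readLE (e.reg .rsp - 16) 8 = (e.reg .r14).toNat := by u_frame hp_r14
    have hp_r13 : s_108132.mem.readLE (e.reg .rsp - 24) 8 = (e.reg .r13).toNat := by
      rw [w_mem_108132]
      u_frame k_r13
    rw [w_mem_108132] at hp_r13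
    have hs_r13 : s_108132r.mem.readLE (e.reg .rsp - 24) 8 = (e.reg .r13).toNat := by u_frame hp_r13
    have hp_r12 : s_108132.mem.readLE (e.reg .rsp - 32) 8 = (e.reg .r12).toNat := by
      rw [w_mem_108132]
      u_frame k_r12
    rw [w_mem_108132] at hp_r12
    have hs_r12 : s_108132r.mem.readLE (e.reg .rsp - 32) 8 = (e.reg .r12).toNat := by u_frame hp_r12
    have hp_rbp : s_108132.mem.readLE (e.reg .rsp - 40) 8 = (e.reg .rbp).toNat := by
      rw [w_mem_108132]
      u_frame k_rbp
    rw [w_mem_108132] at hp_rbp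
    have hs_rbp : s_108132r.mem.readLE (e.reg .rsp - 40) 8 = (e.reg .rbp).toNat := by u_frame hp_rbp
    have hp_rbx : s_108132.mem.readLE (e.reg .rsp - 48) 8 = (e.reg .rbx).toNat := by
      rw [w_mem_108132]
      u_frame k_rbx
    rw [w_mem_108132] at hp_rbx
    have hs_rbx : s_108132r.mem.readLE (e.reg .rsp - 48) 8 = (e.reg .rbx).toNat := by u_frame hp_rbx
    have hp_ra : UInt64.ofNat (s_108132.mem.readLE (e.reg .rsp) 8) = ret := by
      rw [w_mem_108132]
      u_frame k_ra
    rw [w_mem_108132] at hp_ra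
    have hs_ra : UInt64.ofNat (s_108132r.mem.readLE (e.reg .rsp) 8) = ret := by u_frame hp_ra
    -- the footprint since the entry: DGifGetWord's windows lie inside the function's
    have hsame1 : Mem.SameExcept
      [⟨(e.reg .rsp).toNat - 400, (e.reg .rsp).toNat⟩,
       shadowSpan ((e.reg .rsp).toNat - 120) ((e.reg .rsp).toNat - 56),
       ⟨0x800000, 0x1000020⟩,
       ⟨R.cur, R.cur + 8⟩] e.mem s_108132r.mem := by u_same
    -- the heap's invariant comes back with the clean stack at the callee's `rsp + 8` = the body's `rsp`
    have hinv1 : HeapInv H rest (DGifGetScreenDesc.framesIn frames e) ((e.reg .rsp).toNat - 120) s_108132r.mem := by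
      rw [← e_top]
      exact hback.inv
    -- THE EXIT ASSERTION: `Body` at `ret5`, and the result in `eax`
    have hcore1 : DGifGetScreenDesc.Core Gif.L.DGifGetScreenDesc.ret5 H rest frames F R u₀ e ret s_108132r := {
      entry := hcore.entry
      pre := hcore.pre
      rip := w_rip
      rsp := w_rsp
      rbx := (w_kept.get .rbx rfl).trans hcore.rbx
      rbp := (w_kept.get .rbp rfl).trans hcore.rbp
      slot_r15 := hs_r15
      slot_r14 := hs_r14
      slot_r13 := hs_r13
      slot_r12 := hs_r12
      slot_rbp := hs_rbp
      slot_rbx := hs_rbx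
      slot_ra := hs_ra
      rem := by
        have h1 := hback.rem
        rw [hrem0] at h1
        exact Nat.le_trans h1 hcore.rem
      same := hsame1
      code := w_code
      abi := w_inv
    }
    refine ReachVia.done (Or.inl ?_)
    exact {
      body := { core := hcore1, inv := hinv1, ok := hback.ok }
      res := hres1
    }
  · -- 0x1080f7 FROM 0x108129: the first DGifGetWord failed, `r12d = 0`: GIF_ERROR with the entry's heap and forest
    refine ReachVia.done (Or.inr ?_)
    refine sd1_exit_err ⟨hcore, hinv, hok⟩ w_rip w_rsp (w_kept.get .rbx rfl) (w_kept.get .rbp rfl) w_r12 w_mem ?_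
    refine ProgX.Base.abiInv_of ?_ ?_
    · rw [w_flags]
      simp only [X86.User.df_setStatus]
      exact hdf
    · rw [w_mxcsr]
      exact hmx

/-- **108137H (ret5) … 10813BH | 1080F7H** (dgif_lib.c:261-263): `test eax, eax`; GIF_ERROR: `r12d = 0`, to the epilogue (1080F7H) with
the entry's heap and forest; otherwise on to l.266 (10813BH). No store. -/
theorem sd1_seg_tail (Lay : Layout) (hLay : Lay.hi = 0x1000000) (μ : Microarch) (hμ : UserX.MicroOK μ) (u₀ : State)
    (hcode : HasCodeNat Lay u₀ Gif.L.DGifGetScreenDesc.entry Gif.Code.code_DGifGetScreenDesc.nat Gif.L.DGifGetScreenDesc.size)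
    (H : Heap) (rest : List Obj) (frames : List (Nat × FrameLayout)) (F : Forest) (R : Rd) (e : State) (ret : Word)
    (v : State) (hat : sd1_AtRet Gif.L.DGifGetScreenDesc.ret5 H rest frames F R u₀ e ret v) :
    ReachVia Lay μ ProgX.Base.WayInv v (fun w =>
      DGifGetScreenDesc.Body Gif.L.DGifGetScreenDesc.at_10813b H rest frames F R u₀ e ret w ∨
      DGifGetScreenDesc.Exit H rest frames F R u₀ e ret w) := by
  -- THE PRELUDE: the entry assertion, as in `sd1_seg_head`
  obtain ⟨⟨hcore, hinv, hok⟩, _⟩ := hat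
  have he := hcore.entry
  v_entry he
  have w_rip := hcore.rip
  have c_rsp : v.reg .rsp = e.reg .rsp - 120 := hcore.rsp
  -- `eax` as a variable `z` (the branch fact of `test eax, eax` speaks of it)
  obtain ⟨z, c_rax⟩ : ∃ z, v.reg .rax = z := ⟨_, rfl⟩
  have w_kept : RegsKept [.rsp] v v := RegsKept.refl _ _
  have w_eq : Mem.EqOn ProgX.Base.L.textLo ProgX.Base.L.textHi u₀.mem v.mem := ProgX.Base.conv_code_eqOn hcore.code
  have hdf := (show abiInv _ from hcore.abi).1
  have hmx := (show abiInv _ from hcore.abi).2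
  have hsse := ProgX.Base.sseOK_of_abiInv hcore.abi
  -- THE WALK, to the next cut or to the epilogue
  u_walk hcode [hμ.vendor] until [Gif.L.DGifGetScreenDesc.at_10813b, Gif.L.DGifGetScreenDesc.at_1080f7]
    span [ProgX.Base.L.textLo, ProgX.Base.L.textHi] side (v_side)
  · -- 0x1080f7 FROM 0x108129: the second DGifGetWord failed, `r12d = 0`: GIF_ERROR with the entry's heap and forest
    refine ReachVia.done (Or.inr ?_)
    refine sd1_exit_err ⟨hcore, hinv, hok⟩ w_rip w_rsp (w_kept.get .rbx rfl) (w_kept.get .rbp rfl) w_r12 w_mem ?_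
    refine ProgX.Base.abiInv_of ?_ ?_
    · rw [w_flags]
      simp only [X86.User.df_setStatus]
      exact hdf
    · rw [w_mxcsr]
      exact hmx
  · -- 0x10813b: both words were read; nothing but `rip` and the flags changed since `ret5`
    refine ReachVia.done (Or.inl ?_)
    have hcore1 : DGifGetScreenDesc.Core Gif.L.DGifGetScreenDesc.at_10813b H rest frames F R u₀ e ret s_108139 := {
      entry := hcore.entry
      pre := hcore.pre
      rip := w_rip
      rsp := w_rsp
      rbx := (w_kept.get .rbx rfl).trans hcore.rbx
      rbp := (w_kept.get .rbp rfl).trans hcore.rbp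
      slot_r15 := by
        rw [w_mem]
        exact hcore.slot_r15
      slot_r14 := by
        rw [w_mem]
        exact hcore.slot_r14
      slot_r13 := by
        rw [w_mem]
        exact hcore.slot_r13
      slot_r12 := by
        rw [w_mem]
        exact hcore.slot_r12
      slot_rbp := by
        rw [w_mem]
        exact hcore.slot_rbp
      slot_rbx := by
        rw [w_mem]
        exact hcore.slot_rbx
      slot_ra := by
        rw [w_mem]
        exact hcore.slot_ra
      rem := by
        rw [w_mem]
        exact hcore.rem
      same := by
        rw [w_mem]
        exact hcore.same
      code := ProgX.Base.conv_code_in w_eq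
      abi := by
        refine ProgX.Base.abiInv_of ?_ ?_
        · rw [w_flags]
          simp only [X86.User.df_setStatus]
          exact hdf
        · rw [w_mxcsr]
          exact hmx
    }
    exact {
      core := hcore1
      inv := by
        rw [w_mem]
        exact hinv
      ok := by
        rw [w_mem]
        exact hok
    }

end Gif.Spec.DGifGetScreenDesc_1
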